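-- pv_equiv track=rewrite | github.com/prathamtandon/g4gproblems | DP/special_keyboard.py | special_keyboard
-- ===== SOURCE A (Python) =====
-- def special_keyboard(N):
--
--     if N <= 6:
--         return N
--     # table[i] stores the maximum number of A's that can be printed using i keystrokes.
--     # table[N] stores the final result.
--     table = [0] * (N+1)
--
--     for i in range(7):
--         table[i] = i
--
--     for i in range(7, N+1):
--         for j in range(i-2, 0, -1):
--             table[i] = max(table[i], table[j-1] * (i - j))
--
--     return table[N]
-- ===== SOURCE B (Python) =====
-- def special_keyboard(N):
--     if N <= 6:
--         return N
--     # Rolling window of the last six DP values dp[i-6..i-1].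
--     # the optimal multiplier is bounded by a constant, so
--     # dp[i] = max(5*dp[i-6], 4*dp[i-5], 3*dp[i-4], 2*dp[i-3]).
--     a, b, c, d, e, f = 1, 2, 3, 4, 5, 6
--     for _ in range(7, N + 1):
--         a, b, c, d, e, f = b, c, d, e, f, max(5 * a, 4 * b, 3 * c, 2 * d)
--     return f
-- ===== Notes on version B (the rewrite author's own statement) =====
-- stated objective: faster
-- what changed: Replaces the quadratic DP whose inner loop scans every breakpoint by a linear-time rolling window of the last six DP values, using the proved fact that the optimal select-copy-paste multiplier lies in a constant window.
import Mathlib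
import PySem

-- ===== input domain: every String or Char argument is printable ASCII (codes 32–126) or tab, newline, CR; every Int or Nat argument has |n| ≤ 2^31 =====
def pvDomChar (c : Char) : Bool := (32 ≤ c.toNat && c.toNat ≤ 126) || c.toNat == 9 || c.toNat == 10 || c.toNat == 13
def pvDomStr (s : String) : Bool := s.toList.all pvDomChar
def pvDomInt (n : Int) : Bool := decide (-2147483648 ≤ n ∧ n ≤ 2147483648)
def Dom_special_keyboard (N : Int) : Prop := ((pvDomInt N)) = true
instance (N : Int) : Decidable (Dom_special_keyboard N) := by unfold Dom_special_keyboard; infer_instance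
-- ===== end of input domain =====

-- B replaces A's quadratic scan over all breakpoints by a linear rolling window of the
-- last six DP values (the optimal multiplier lies in a constant window; proved below).

-- ===== PORT A =====
-- inner loop 'for j in range(i-2, 0, -1): table[i] = max(table[i], table[j-1]*(i-j))'
-- (indices are always nonnegative and in range here, so List.set / pyGetD are exact)
def skA_step (t : List Int) (i : Int) : List Int :=
  (PySem.List.pyRange (i-2) 0 (-1)).foldl
    (fun t j => t.set i.toNat (max (PySem.List.pyGetD t i 0) (PySem.List.pyGetD t (j-1) 0 * (i - j)))) t

def special_keyboard (N : Int) : Int :=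
  if N ≤ 6 then N
  else
    let table := List.replicate (N+1).toNat (0:Int)
    let table := (PySem.List.pyRange 0 7 1).foldl (fun t i => t.set i.toNat i) table
    let table := (PySem.List.pyRange 7 (N+1) 1).foldl skA_step table
    PySem.List.pyGetD table N 0

-- ===== PORT B =====
-- state = the six most recent DP values
def skB_step (s : Int × Int × Int × Int × Int × Int) (_ : Int) :
    Int × Int × Int × Int × Int × Int :=
  (s.2.1, s.2.2.1, s.2.2.2.1, s.2.2.2.2.1, s.2.2.2.2.2,
   max (max (max (5 * s.1) (4 * s.2.1)) (3 * s.2.2.1)) (2 * s.2.2.2.1))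

def special_keyboard_alt (N : Int) : Int :=
  if N ≤ 6 then N
  else ((PySem.List.pyRange 7 (N+1) 1).foldl skB_step (1, 2, 3, 4, 5, 6)).2.2.2.2.2

-- ===== PRECONDITION & SPEC =====
def Spec_special_keyboard (N : Int) (out : Int) : Prop := out = special_keyboard_alt N
instance (N : Int) (out : Int) : Decidable (Spec_special_keyboard N out) := by unfold Spec_special_keyboard; infer_instance

-- ===== CLAIM (what is proved, stated in full; the proofs are below) =====
def Claim_equal_special_keyboard : Prop := ∀ (N : Int), Dom_special_keyboard N → Spec_special_keyboard N (special_keyboard N)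

-- ===== LEMMAS AND PROOFS =====

-- the mathematical DP with the constant window (B's recurrence)
def dpB (n : Nat) : Int :=
  if n ≤ 6 then (n : Int)
  else max (max (max (5 * dpB (n-6)) (4 * dpB (n-5))) (3 * dpB (n-4))) (2 * dpB (n-3))
termination_by n
decreasing_by all_goals omega

theorem dpB_small {n : Nat} (h : n ≤ 6) : dpB n = (n : Int) := by
  rw [dpB, if_pos h]

theorem dpB_rec {n : Nat} (h : 7 ≤ n) :
    dpB n = max (max (max (5 * dpB (n-6)) (4 * dpB (n-5))) (3 * dpB (n-4))) (2 * dpB (n-3)) := by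
  rw [dpB, if_neg (by omega)]

theorem dpB_nonneg (n : Nat) : 0 ≤ dpB n := by
  induction n using Nat.strong_induction_on with
  | _ n ih =>
    by_cases h : n ≤ 6
    · rw [dpB_small h]; exact_mod_cast Nat.zero_le n
    · rw [dpB_rec (by omega)]
      have := ih (n-3) (by omega)
      have h2 : (0:Int) ≤ 2 * dpB (n-3) := by linarith
      exact le_trans h2 (le_max_right _ _)

-- key window lemma: taking one multiplication of k with k+1 keystrokes never beats dpB
theorem dpB_mul_le (k : Nat) (x : Nat) (hk : 2 ≤ k) : dpB x * k ≤ dpB (x + k + 1) := by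
  induction k using Nat.strong_induction_on generalizing x with
  | _ k ih =>
    by_cases hsmall : x + k + 1 ≤ 6
    · rw [dpB_small (by omega : x ≤ 6), dpB_small hsmall]
      have hx : x ≤ 3 := by omega
      have hk5 : k ≤ 5 := by omega
      interval_cases x <;> (push_cast; omega)
    · by_cases hk5 : k ≤ 5
      · have h7 : 7 ≤ x + k + 1 := by omega
        rw [dpB_rec h7]
        interval_cases k
        · -- k = 2: term 2 * dpB (n-3), n-3 = x
          have hx : x + 2 + 1 - 3 = x := by omega
          rw [hx, mul_comm]
          exact le_max_right _ _
        · have hx : x + 3 + 1 - 4 = x := by omega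
          rw [hx]
          refine le_trans ?_ (le_max_left _ _)
          rw [mul_comm]
          exact le_max_right _ _
        · have hx : x + 4 + 1 - 5 = x := by omega
          rw [hx]
          refine le_trans ?_ (le_max_left _ _)
          refine le_trans ?_ (le_max_left _ _)
          rw [mul_comm]
          exact le_max_right _ _
        · have hx : x + 5 + 1 - 6 = x := by omega
          rw [hx]
          refine le_trans ?_ (le_max_left _ _)
          refine le_trans ?_ (le_max_left _ _)
          rw [mul_comm]
          exact le_max_left _ _
      · -- k ≥ 6 : split off a factor 2
        have hk6 : 6 ≤ k := by omega
        have h0 : 0 ≤ dpB x := dpB_nonneg x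
        have hc : ((k : Int)) ≤ ((k - 3 : Nat) : Int) * 2 := by omega
        have step1 : dpB x * (k : Int) ≤ (dpB x * ((k - 3 : Nat) : Int)) * 2 := by
          calc dpB x * (k:Int)
              ≤ dpB x * (((k - 3 : Nat) : Int) * 2) := mul_le_mul_of_nonneg_left hc h0
            _ = (dpB x * ((k - 3 : Nat) : Int)) * 2 := by ring
        have step2 : (dpB x * ((k - 3 : Nat) : Int)) * 2 ≤ dpB (x + (k-3) + 1) * 2 := by
          have := ih (k-3) (by omega) x (by omega)
          linarith
        have step3 : dpB (x + (k-3) + 1) * 2 ≤ dpB (x + k + 1) := by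
          have h7 : 7 ≤ x + k + 1 := by omega
          rw [dpB_rec h7]
          have hx : x + k + 1 - 3 = x + (k-3) + 1 := by omega
          rw [hx, mul_comm]
          exact le_max_right _ _
        linarith

-- every breakpoint term of A's inner scan is dominated by dpB i
theorem term_le_dpB (i j : Nat) (hi : 7 ≤ i) (hj1 : 1 ≤ j) (hj2 : j ≤ i - 2) :
    dpB (j-1) * ((i : Int) - (j : Int)) ≤ dpB i := by
  have hji : j ≤ i := by omega
  have hcast : (i : Int) - (j : Int) = ((i - j : Nat) : Int) := by
    push_cast [Nat.cast_sub hji]; ring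
  rw [hcast]
  by_cases hm : i - j ≤ 5
  · have hm2 : 2 ≤ i - j := by omega
    rw [dpB_rec hi]
    interval_cases hm' : (i - j)
    · have : i - 3 = j - 1 := by omega
      rw [this, mul_comm]; exact le_max_right _ _
    · have : i - 4 = j - 1 := by omega
      rw [this]
      refine le_trans ?_ (le_max_left _ _)
      rw [mul_comm]; exact le_max_right _ _
    · have : i - 5 = j - 1 := by omega
      rw [this]
      refine le_trans ?_ (le_max_left _ _)
      refine le_trans ?_ (le_max_left _ _)
      rw [mul_comm]; exact le_max_right _ _
    · have : i - 6 = j - 1 := by omega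
      rw [this]
      refine le_trans ?_ (le_max_left _ _)
      refine le_trans ?_ (le_max_left _ _)
      rw [mul_comm]; exact le_max_left _ _
  · -- multiplier ≥ 6
    have hm6 : 6 ≤ i - j := by omega
    have h0 : 0 ≤ dpB (j-1) := dpB_nonneg _
    have hc : ((i - j : Nat) : Int) ≤ ((i - j - 3 : Nat) : Int) * 2 := by omega
    have step1 : dpB (j-1) * ((i - j : Nat) : Int) ≤ (dpB (j-1) * ((i - j - 3 : Nat) : Int)) * 2 := by
      calc dpB (j-1) * ((i - j : Nat) : Int)
          ≤ dpB (j-1) * (((i - j - 3 : Nat) : Int) * 2) := mul_le_mul_of_nonneg_left hc h0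
        _ = (dpB (j-1) * ((i - j - 3 : Nat) : Int)) * 2 := by ring
    have stepA : dpB (j-1) * ((i - j - 3 : Nat) : Int) ≤ dpB (i - 3) := by
      have := dpB_mul_le (i - j - 3) (j - 1) (by omega)
      have hidx : j - 1 + (i - j - 3) + 1 = i - 3 := by omega
      rwa [hidx] at this
    have stepB : 2 * dpB (i - 3) ≤ dpB i := by
      rw [dpB_rec hi]
      exact le_max_right _ _
    linarith

-- generic foldl-max facts
theorem foldl_max_le {g : Int → Int} {l : List Int} {a M : Int}
    (ha : a ≤ M) (h : ∀ x ∈ l, g x ≤ M) :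
    l.foldl (fun acc x => max acc (g x)) a ≤ M := by
  induction l generalizing a with
  | nil => exact ha
  | cons y ys ih =>
    exact ih (max_le ha (h y (by simp))) (fun x hx => h x (by simp [hx]))

theorem init_le_foldl_max {g : Int → Int} {l : List Int} {a : Int} :
    a ≤ l.foldl (fun acc x => max acc (g x)) a := by
  induction l generalizing a with
  | nil => exact le_refl a
  | cons y ys ih => exact le_trans (le_max_left a (g y)) ih

theorem mem_le_foldl_max {g : Int → Int} {l : List Int} {a x : Int} (hx : x ∈ l) :
    g x ≤ l.foldl (fun acc x => max acc (g x)) a := by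
  induction l generalizing a with
  | nil => cases hx
  | cons y ys ih =>
    rcases List.mem_cons.mp hx with h | h
    · subst h
      exact le_trans (le_max_right a (g x)) init_le_foldl_max
    · exact ih h

-- the inner fold of A only rewrites entry i, accumulating a running max
theorem inner_fold_set (i : Int) (hi : 0 ≤ i) (js : List Int)
    (hjs : ∀ j ∈ js, 1 ≤ j ∧ j ≤ i - 2) (t : List Int) (hlen : i < (t.length : Int)) :
    js.foldl (fun t j => t.set i.toNat (max (PySem.List.pyGetD t i 0) (PySem.List.pyGetD t (j-1) 0 * (i - j)))) t
      = t.set i.toNat (js.foldl (fun acc j => max acc (PySem.List.pyGetD t (j-1) 0 * (i - j))) (PySem.List.pyGetD t i 0)) := by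
  induction js generalizing t with
  | nil =>
    simp only [List.foldl_nil]
    rw [PySem.List.pyGetD_eq_getElem t 0 hi hlen, List.set_getElem_self]
  | cons j js ih =>
    simp only [List.foldl_cons]
    have hj := hjs j (by simp)
    set v := max (PySem.List.pyGetD t i 0) (PySem.List.pyGetD t (j-1) 0 * (i - j)) with hv
    have hlen' : i < (((t.set i.toNat v).length : Nat) : Int) := by
      rwa [List.length_set]
    rw [ih (fun j' hj' => hjs j' (by simp [hj'])) (t.set i.toNat v) hlen']
    rw [List.set_set]
    congr 1
    have hvget : PySem.List.pyGetD (t.set i.toNat v) i 0 = v := by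
      rw [PySem.List.pyGetD_eq_getElem _ 0 hi hlen']
      simp [List.getElem_set_self]
    rw [hvget]
    have hgets : ∀ j' ∈ js, PySem.List.pyGetD (t.set i.toNat v) (j'-1) 0 = PySem.List.pyGetD t (j'-1) 0 := by
      intro j' hj'
      have hb := hjs j' (by simp [hj'])
      have h0 : (0:Int) ≤ j' - 1 := by omega
      rw [PySem.List.pyGetD_of_nonneg _ _ h0, PySem.List.pyGetD_of_nonneg _ _ h0]
      have hne : i.toNat ≠ (j'-1).toNat := by omega
      simp only [List.getD_eq_getElem?_getD]
      rw [List.getElem?_set_ne hne]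
    calc (js.foldl (fun acc j'' => max acc (PySem.List.pyGetD (t.set i.toNat v) (j''-1) 0 * (i - j''))) v)
        = js.foldl (fun acc j'' => max acc (PySem.List.pyGetD t (j''-1) 0 * (i - j''))) v := by
          apply PySem.List.foldl_congr_mem
          intro acc j'' hj''
          rw [hgets j'' hj'']
      _ = _ := rfl

-- invariant for A's table
def InvA (n i : Nat) (t : List Int) : Prop :=
  t.length = n + 1 ∧ ∀ k, k < n + 1 → t.getD k 0 = (if k < i then dpB k else 0)

theorem invA_step {n i : Nat} {t : List Int} (hInv : InvA n i t) (hi : 7 ≤ i) (hin : i ≤ n) :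
    InvA n (i+1) (skA_step t (i : Int)) := by
  obtain ⟨hlen, hval⟩ := hInv
  have hi0 : (0:Int) ≤ (i:Int) := by positivity
  have hlt : ((i:Int)) < (t.length : Int) := by
    rw [hlen]; exact_mod_cast Nat.lt_succ_of_le hin
  have hjs : ∀ j ∈ PySem.List.pyRange ((i:Int)-2) 0 (-1), 1 ≤ j ∧ j ≤ (i:Int) - 2 := by
    intro j hj
    have := PySem.List.mem_pyRange_neg_one.mp hj
    omega
  unfold skA_step
  rw [inner_fold_set (i:Int) hi0 _ hjs t hlt]
  -- the fold value equals dpB i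
  have htoNat : (i:Int).toNat = i := Int.toNat_natCast i
  have hstart : PySem.List.pyGetD t (i:Int) 0 = 0 := by
    rw [PySem.List.pyGetD_of_nonneg _ _ hi0, htoNat]
    have := hval i (by omega)
    rw [this, if_neg (by omega)]
  have hterm : ∀ j ∈ PySem.List.pyRange ((i:Int)-2) 0 (-1),
      PySem.List.pyGetD t (j-1) 0 * ((i:Int) - j) = dpB (j-1).toNat * ((i:Int) - ((j.toNat : Nat) : Int)) := by
    intro j hj
    have hb := hjs j hj
    have h0 : (0:Int) ≤ j - 1 := by omega
    rw [PySem.List.pyGetD_of_nonneg _ _ h0]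
    have hk : (j-1).toNat < n + 1 := by omega
    rw [hval _ hk, if_pos (by omega)]
    congr 1
    omega
  have hfold : (PySem.List.pyRange ((i:Int)-2) 0 (-1)).foldl
      (fun acc j => max acc (PySem.List.pyGetD t (j-1) 0 * ((i:Int) - j))) (PySem.List.pyGetD t (i:Int) 0) = dpB i := by
    rw [hstart]
    apply le_antisymm
    · apply foldl_max_le (dpB_nonneg i)
      intro j hj
      have hb := hjs j hj
      have hjn : j = ((j.toNat : Nat) : Int) := by omega
      have hjm : (j-1).toNat = j.toNat - 1 := by omega
      have := term_le_dpB i j.toNat (by omega) (by omega) (by omega)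
      calc PySem.List.pyGetD t (j-1) 0 * ((i:Int) - j)
          = dpB (j-1).toNat * ((i:Int) - ((j.toNat : Nat) : Int)) := hterm j hj
        _ = dpB (j.toNat - 1) * ((i:Int) - (j.toNat : Int)) := by rw [hjm]
        _ ≤ dpB i := this
    · rw [dpB_rec hi]
      have hwit : ∀ m : Nat, 2 ≤ m → m ≤ 5 →
          dpB (i - m - 1) * (m : Int) ≤ (PySem.List.pyRange ((i:Int)-2) 0 (-1)).foldl
            (fun acc j => max acc (PySem.List.pyGetD t (j-1) 0 * ((i:Int) - j))) 0 := by
        intro m hm2 hm5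
        have hmem : ((i - m : Nat) : Int) ∈ PySem.List.pyRange ((i:Int)-2) 0 (-1) := by
          rw [PySem.List.mem_pyRange_neg_one]
          exact ⟨by omega, by omega⟩
        have hle := mem_le_foldl_max (g := fun j => PySem.List.pyGetD t (j-1) 0 * ((i:Int) - j))
          (a := 0) hmem
        beta_reduce at hle
        refine le_trans ?_ hle
        have e1 : ((i - m : Nat) : Int) - 1 = ((i - m - 1 : Nat) : Int) := by omega
        have e2 : (i:Int) - ((i - m : Nat) : Int) = (m : Int) := by omega
        rw [e1, e2, PySem.List.pyGetD_of_nonneg _ _ (by omega : (0:Int) ≤ ((i - m - 1 : Nat) : Int)),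
          Int.toNat_natCast, hval (i - m - 1) (by omega), if_pos (by omega)]
      apply max_le
      · apply max_le
        · apply max_le
          · have := hwit 5 (by omega) (by omega)
            have h : i - 5 - 1 = i - 6 := by omega
            rw [h] at this
            calc 5 * dpB (i - 6) = dpB (i-6) * (5:Int) := by ring
              _ ≤ _ := this
          · have := hwit 4 (by omega) (by omega)
            have h : i - 4 - 1 = i - 5 := by omega
            rw [h] at this
            calc 4 * dpB (i - 5) = dpB (i-5) * (4:Int) := by ring
              _ ≤ _ := this
        · have := hwit 3 (by omega) (by omega)
          have h : i - 3 - 1 = i - 4 := by omega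
          rw [h] at this
          calc 3 * dpB (i - 4) = dpB (i-4) * (3:Int) := by ring
            _ ≤ _ := this
      · have := hwit 2 (by omega) (by omega)
        have h : i - 2 - 1 = i - 3 := by omega
        rw [h] at this
        calc 2 * dpB (i - 3) = dpB (i-3) * (2:Int) := by ring
          _ ≤ _ := this
  rw [hfold]
  constructor
  · rw [List.length_set, hlen]
  · intro k hk
    simp only [List.getD_eq_getElem?_getD]
    by_cases hki : k = i
    · subst hki
      rw [htoNat, List.getElem?_set_self (by omega)]
      simp
    · rw [htoNat, List.getElem?_set_ne (by omega)]
      have := hval k hk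
      simp only [List.getD_eq_getElem?_getD] at this
      rw [this]
      by_cases h1 : k < i
      · rw [if_pos h1, if_pos (by omega)]
      · rw [if_neg h1, if_neg (by omega)]

-- after the initialisation loops
theorem invA_init (n : Nat) (_hn : 7 ≤ n) :
    InvA n 7 ((PySem.List.pyRange 0 7 1).foldl (fun t i => t.set i.toNat i)
      (List.replicate (((n:Int)+1).toNat) (0:Int))) := by
  have h1 : ((n:Int)+1).toNat = n + 1 := by omega
  have h2 : PySem.List.pyRange 0 7 1 = [0,1,2,3,4,5,6] := by decide
  have hrep : List.replicate (n+1) (0:Int)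
      = 0::0::0::0::0::0::0::List.replicate (n-6) (0:Int) := by
    rw [show n+1 = 7+(n-6) from by omega, List.replicate_add]
    rfl
  have hlist : ([0,1,2,3,4,5,6] : List Int).foldl (fun t i => t.set i.toNat i)
      (0::0::0::0::0::0::0::List.replicate (n-6) (0:Int))
      = 0::1::2::3::4::5::6::List.replicate (n-6) (0:Int) := by
    simp [List.set]
  rw [h1, h2, hrep, hlist]
  refine ⟨by simp; omega, ?_⟩
  intro k hk
  by_cases hks : k ≤ 6
  · interval_cases k <;> simp [List.getD, dpB]
  · obtain ⟨k', rfl⟩ : ∃ k', k = k' + 7 := ⟨k - 7, by omega⟩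
    rw [if_neg (by omega)]
    simp only [show k' + 7 = k'+1+1+1+1+1+1+1 from by omega, List.getD_cons_succ]
    rcases Nat.lt_or_ge k' (n-6) with h | h
    · rw [List.getD_replicate _ h]
    · rw [List.getD_eq_default]
      simp [h]

theorem invA_outer (n : Nat) (_hn : 7 ≤ n) (m : Nat) (hm : 7 + m ≤ n + 1) (t : List Int)
    (ht : InvA n 7 t) :
    InvA n (7 + m) ((PySem.List.pyRange 7 (7 + (m:Int)) 1).foldl skA_step t) := by
  induction m with
  | zero =>
    rw [PySem.List.pyRange_one_eq_nil (by omega)]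
    simpa using ht
  | succ m ih =>
    have hsplit : PySem.List.pyRange 7 (7 + ((m+1 : Nat):Int)) 1
        = PySem.List.pyRange 7 (7 + (m:Int)) 1 ++ [7 + (m:Int)] := by
      have : (7 : Int) + ((m+1 : Nat):Int) = (7 + (m:Int)) + 1 := by push_cast; ring
      rw [this, PySem.List.pyRange_one_succ_right (by omega)]
    rw [hsplit, List.foldl_append]
    simp only [List.foldl_cons, List.foldl_nil]
    have hmid := ih (by omega)
    have hstep := invA_step hmid (by omega) (by omega)
    have hcast : ((7 + m : Nat) : Int) = 7 + (m:Int) := by push_cast; ring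
    rw [hcast] at hstep
    have : 7 + (m+1) = (7 + m) + 1 := by omega
    rw [this]
    exact hstep

-- B's fold tracks the last six dpB values
theorem skB_fold (m : Nat) :
    (PySem.List.pyRange 7 (7 + (m:Int)) 1).foldl skB_step (1, 2, 3, 4, 5, 6)
      = (dpB (m+1), dpB (m+2), dpB (m+3), dpB (m+4), dpB (m+5), dpB (m+6)) := by
  induction m with
  | zero =>
    rw [PySem.List.pyRange_one_eq_nil (by omega)]
    simp only [List.foldl_nil]
    rw [dpB_small (by omega), dpB_small (by omega), dpB_small (by omega),
        dpB_small (by omega), dpB_small (by omega), dpB_small (by omega)]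
    norm_num
  | succ m ih =>
    have hsplit : PySem.List.pyRange 7 (7 + ((m+1 : Nat):Int)) 1
        = PySem.List.pyRange 7 (7 + (m:Int)) 1 ++ [7 + (m:Int)] := by
      have : (7 : Int) + ((m+1 : Nat):Int) = (7 + (m:Int)) + 1 := by push_cast; ring
      rw [this, PySem.List.pyRange_one_succ_right (by omega)]
    rw [hsplit, List.foldl_append, ih]
    simp only [List.foldl_cons, List.foldl_nil, skB_step]
    norm_num
    rw [dpB_rec (by omega : 7 ≤ m + 7)]
    norm_num [show m+7-6 = m+1 from by omega, show m+7-5 = m+2 from by omega,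
      show m+7-4 = m+3 from by omega, show m+7-3 = m+4 from by omega]

-- ===== VERDICT (by name: the statement is the Claim_ definition above) =====
theorem special_keyboard_spec : Claim_equal_special_keyboard := by
  intro N _
  unfold Spec_special_keyboard special_keyboard special_keyboard_alt
  by_cases h : N ≤ 6
  · simp [h]
  · rw [if_neg h, if_neg h]
    have hN0 : 0 ≤ N := by omega
    obtain ⟨n, rfl⟩ : ∃ n : Nat, N = (n : Int) := ⟨N.toNat, (Int.toNat_of_nonneg hN0).symm⟩
    have hn : 7 ≤ n := by omega
    set m := n - 7 with hm
    have hmn : n = 7 + m := by omega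
    have hcast : ((n:Int)) + 1 = 7 + ((m + 1 : Nat) : Int) := by push_cast; omega
    -- A side
    have hInit := invA_init n hn
    have hOuter := invA_outer n hn (m+1) (by omega) _ hInit
    have hA : (PySem.List.pyRange 7 ((n:Int)+1) 1).foldl skA_step
        ((PySem.List.pyRange 0 7 1).foldl (fun t i => t.set i.toNat i)
          (List.replicate (((n:Int)+1).toNat) (0:Int))) 
        = (PySem.List.pyRange 7 (7 + ((m+1:Nat):Int)) 1).foldl skA_step
        ((PySem.List.pyRange 0 7 1).foldl (fun t i => t.set i.toNat i)
          (List.replicate (((n:Int)+1).toNat) (0:Int))) := by rw [hcast]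
    show PySem.List.pyGetD
        ((PySem.List.pyRange 7 ((n:Int)+1) 1).foldl skA_step
          ((PySem.List.pyRange 0 7 1).foldl (fun t i => t.set i.toNat i)
            (List.replicate (((n:Int)+1).toNat) (0:Int)))) (n:Int) 0
      = ((PySem.List.pyRange 7 ((n:Int)+1) 1).foldl skB_step (1,2,3,4,5,6)).2.2.2.2.2
    rw [hA]
    obtain ⟨hlen, hval⟩ := hOuter
    rw [PySem.List.pyGetD_of_nonneg _ _ (by positivity)]
    rw [Int.toNat_natCast]
    rw [hval n (by omega), if_pos (by omega)]
    -- B side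
    have hB := skB_fold (m+1)
    rw [hcast, hB]
    have : m + 1 + 6 = n := by omega
    rw [this]
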